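-- pv_equiv track=rewrite | github.com/lkwagner/StochasticSchool | Day3_FCIQMC/solutions/det_ops.py | elec_exchange_ops
-- ===== SOURCE A (Python) =====
-- def elec_exchange_ops(det, ind):
--     ''' Given a determinant defined by a list of occupied orbitals
--     which is ordered apart from one element (ind), find the number of
--     local (nearest neighbour) electron exchanges required to order the
--     list of occupied orbitals.
--
--     We can assume that there are no repeated elements of the list, and that
--     the list is ordered apart from one element on entry.
--
--     Return: The number of pairwise permutations required.'''
--
--     # A better way to do it!
--     if True:
--
--         a_orb = det[ind]
--         det_sort = sorted(det)
--         newind = det_sort.index(a_orb)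
--         perm = abs(newind - ind)
--     else:
--         # A brute force way to do it!
--
--         n = len(det)    # The number of electrons
--         perm = 0
--
--         # Do we want to do pairwise permutations going up (i.e. element is too
--         # small for its position), or down (i.e. element is too large for
--         # its position) the list.
--         search_up = True
--         if ind == 0:
--             # The replaced element is at the beginning of the list
--             search_up = True
--         elif ind == n-1:
--             # The replaced element is at the end of the list
--             search_up = False
--         elif det[ind-1] > det[ind]:
--             # The replaced element is smaller than the preceeding element.
--             # We therefore have to search down (otherwise, up)
--             search_up = False
--
--         if search_up:
--             for x in range(ind+1,n):
--                 if det[ind] < det[x]: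
--                     # We have gone through enough pair-wise permutations
--                     # and have now found its rightful spot!
--                     break
--                 perm += 1
--         else:
--             for x in range(ind-1,-1,-1):
--                 if det[ind] > det[x]:
--                     # We have gone through enough pair-wise permutations
--                     # and have now found its rightful spot!
--                     break
--                 perm += 1
--     return perm
-- ===== SOURCE B (Python) =====
-- def elec_exchange_ops(det, ind):
--     '''Number of nearest-neighbour exchanges: det[ind]'s sorted position is
--     the number of strictly smaller elements, counted in one explicit pass.'''
--     a_orb = det[ind]
--     pos = 0
--     for x in det:
--         if x < a_orb:
--             pos += 1
--     return abs(pos - ind)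
-- ===== Notes on version B (the rewrite author's own statement) =====
-- stated objective: faster
-- what changed: Instead of building a sorted copy and scanning it with .index, B makes a single accumulator loop over the unsorted list counting elements strictly smaller than det[ind], which is that element's first index in the sorted list.
import Mathlib
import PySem

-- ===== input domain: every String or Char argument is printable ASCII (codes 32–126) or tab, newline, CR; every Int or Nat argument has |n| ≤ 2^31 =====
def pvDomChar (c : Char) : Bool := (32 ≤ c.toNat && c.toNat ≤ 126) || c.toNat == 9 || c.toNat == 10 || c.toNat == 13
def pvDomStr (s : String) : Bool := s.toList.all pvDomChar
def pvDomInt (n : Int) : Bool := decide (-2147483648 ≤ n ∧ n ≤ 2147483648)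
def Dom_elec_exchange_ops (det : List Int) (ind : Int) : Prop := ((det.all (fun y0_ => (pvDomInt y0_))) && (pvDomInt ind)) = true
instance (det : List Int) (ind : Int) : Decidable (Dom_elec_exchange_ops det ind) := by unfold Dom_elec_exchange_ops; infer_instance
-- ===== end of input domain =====

-- B replaces A's sort + .index by one accumulator loop over the unsorted list
-- counting the elements strictly smaller than det[ind] (faster: O(n) vs O(n log n)).


-- ===== PORT A =====
-- a_orb = det[ind]; det_sort = sorted(det); newind = det_sort.index(a_orb); abs(newind - ind)
def elec_exchange_ops (det : List Int) (ind : Int) : Int :=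
  match PySem.List.pyGet? det ind with
  | none => 0   -- IndexError: excluded by Pre_
  | some a_orb =>
    let det_sort := PySem.List.sorted det (fun x => x) false
    match PySem.List.index? det_sort a_orb with
    | none => 0   -- ValueError: unreachable (a_orb ∈ det)
    | some newind => |(newind : Int) - ind|

-- ===== PORT B =====
-- a_orb = det[ind]; pos = 0; for x in det: if x < a_orb: pos += 1; abs(pos - ind)
-- (pyGetD is exact under Pre_, which guarantees ind is in range)
def elec_exchange_ops_alt (det : List Int) (ind : Int) : Int :=
  let a_orb := PySem.List.pyGetD det ind 0
  let pos := det.foldl (fun pos x => if x < a_orb then pos + 1 else pos) (0 : Int)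
  |pos - ind|

-- ===== PRECONDITION & SPEC =====
-- Pre_ excludes exactly the IndexError inputs: ind out of range for det (incl. empty det).
def Pre_elec_exchange_ops (det : List Int) (ind : Int) : Prop :=
  PySem.Raise.InRange det.length ind
instance (det : List Int) (ind : Int) : Decidable (Pre_elec_exchange_ops det ind) := by
  unfold Pre_elec_exchange_ops; infer_instance
def pvWitness_elec_exchange_ops : List Int × Int := ([3, 1, 2, 5], 0)

def Spec_elec_exchange_ops (det : List Int) (ind : Int) (out : Int) : Prop := out = elec_exchange_ops_alt det ind
instance (det : List Int) (ind : Int) (out : Int) : Decidable (Spec_elec_exchange_ops det ind out) := by unfold Spec_elec_exchange_ops; infer_instance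

-- ===== CLAIM (what is proved, stated in full; the proofs are below) =====
def Claim_equal_elec_exchange_ops : Prop := ∀ (det : List Int) (ind : Int), Dom_elec_exchange_ops det ind → Pre_elec_exchange_ops det ind → Spec_elec_exchange_ops det ind (elec_exchange_ops det ind)

-- ===== LEMMAS AND PROOFS =====

-- In a (weakly) sorted list the first occurrence of a member sits exactly after
-- the elements strictly smaller than it.
theorem index?_pairwise_eq_countP (l : List Int) (a : Int)
    (hp : l.Pairwise (· ≤ ·)) (ha : a ∈ l) :
    PySem.List.index? l a = some (l.countP (fun x => decide (x < a))) := by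
  induction l with
  | nil => cases ha
  | cons x xs ih =>
    rw [List.pairwise_cons] at hp
    by_cases hx : x = a
    · subst hx
      rw [PySem.List.index?_cons_self]
      have hc : (x :: xs).countP (fun y => decide (y < x)) = 0 := by
        rw [List.countP_eq_zero]
        intro y hy
        simp only [decide_eq_true_eq]
        rcases List.mem_cons.mp hy with rfl | hy
        · omega
        · exact not_lt.mpr (hp.1 y hy)
      rw [hc]
    · have ha' : a ∈ xs := by
        rcases List.mem_cons.mp ha with rfl | h
        · exact absurd rfl hx
        · exact h
      rw [PySem.List.index?_cons_of_ne xs hx, ih hp.2 ha', List.countP_cons]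
      have hxa : x < a := lt_of_le_of_ne (hp.1 a ha') hx
      simp [hxa]

theorem elec_exchange_ops_eq_alt (det : List Int) (ind : Int)
    (h : Pre_elec_exchange_ops det ind) :
    elec_exchange_ops det ind = elec_exchange_ops_alt det ind := by
  obtain ⟨a, hget⟩ : ∃ a, PySem.List.pyGet? det ind = some a := by
    cases hg : PySem.List.pyGet? det ind with
    | none => exact absurd h (PySem.List.pyGet?_eq_none_iff _ _ |>.mp hg)
    | some a => exact ⟨a, rfl⟩
  have hgetD : PySem.List.pyGetD det ind 0 = a := by
    simp [PySem.List.pyGetD, hget]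
  have hmem : a ∈ det := PySem.List.mem_of_pyGet?_eq_some _ hget
  have hmem' : a ∈ PySem.List.sorted det (fun x => x) false :=
    (PySem.List.mem_sorted _ _ _ _).mpr hmem
  have hp : (PySem.List.sorted det (fun x => x) false).Pairwise (· ≤ ·) :=
    PySem.List.sorted_pairwise det (fun x => x)
  have hidx := index?_pairwise_eq_countP _ a hp hmem'
  have hcnt : (PySem.List.sorted det (fun x => x) false).countP
      (fun x => decide (x < a)) = det.countP (fun x => decide (x < a)) :=
    (PySem.List.sorted_perm det (fun x => x) false).countP_eq _
  have hfold := PySem.List.foldl_ite_add_one (fun x => x < a) det (0 : Int)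
  simp only [elec_exchange_ops, elec_exchange_ops_alt, hget, hgetD, hidx, hcnt, hfold]
  ring_nf

-- ===== VERDICT (by name: the statement is the Claim_ definition above) =====
theorem elec_exchange_ops_spec : Claim_equal_elec_exchange_ops := by
  intro det ind _ hpre
  exact elec_exchange_ops_eq_alt det ind hpre
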